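-- pv_equiv track=rewrite | github.com/asrvsn/gds | gds/utils/common.py | disambiguate_strings
-- ===== SOURCE A (Python) =====
-- from typing import Tuple, List, Any, Iterable, Callable, Dict, Set
--
-- def disambiguate_strings(ls: List[str]):
-- 	ret = []
-- 	mp = dict()
-- 	for s in ls:
-- 		if s in mp:
-- 			mp[s] += 1
-- 			ret.append(s + f'_{mp[s]}')
-- 		else:
-- 			mp[s] = 1
-- 			ret.append(s)
-- 	return ret
-- ===== SOURCE B (Python) =====
-- from typing import List
--
-- def disambiguate_strings(ls: List[str]):
-- 	out = [''] * len(ls)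
-- 	for s in dict.fromkeys(ls):
-- 		k = 0
-- 		for i, x in enumerate(ls):
-- 			if x == s:
-- 				k += 1
-- 				out[i] = x if k == 1 else x + f'_{k}'
-- 	return out
-- ===== Notes on version B (the rewrite author's own statement) =====
-- stated objective: alternative
-- what changed: B drops A's single in-order pass with a running-count dict: it pre-allocates the output array and loops over the distinct strings (dict.fromkeys order), scatter-writing every occurrence of each string with its suffix into its slot.
import Mathlib
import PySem

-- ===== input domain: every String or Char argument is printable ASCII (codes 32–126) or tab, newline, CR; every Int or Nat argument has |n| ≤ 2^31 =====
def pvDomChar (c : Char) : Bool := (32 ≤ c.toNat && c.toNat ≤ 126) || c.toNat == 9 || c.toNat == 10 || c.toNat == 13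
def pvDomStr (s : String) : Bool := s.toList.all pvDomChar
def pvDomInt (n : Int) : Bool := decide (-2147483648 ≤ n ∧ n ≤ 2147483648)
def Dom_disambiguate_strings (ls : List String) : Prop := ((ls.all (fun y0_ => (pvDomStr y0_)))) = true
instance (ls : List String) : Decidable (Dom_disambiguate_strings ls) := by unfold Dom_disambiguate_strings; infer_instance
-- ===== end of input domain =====

-- B replaces A's single in-order pass with a running-count dict by a pre-allocated output
-- array and an outer loop over the DISTINCT strings (first-occurrence order), scatter-writing
-- all occurrences of each string with their suffix. Both are total; outputs are equal.

-- ===== PORT A =====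
-- loop 'for s in ls' with accumulators ret (output list) and mp (running-count dict)
def disambiguate_strings_goA : List String → List String → PySem.Dict String Int → List String
  | [], ret, _ => ret
  | s :: rest, ret, mp =>
    if mp.contains s then
      -- mp[s] += 1; ret.append(s + f'_{mp[s]}')
      disambiguate_strings_goA rest (ret ++ [s ++ "_" ++ PySem.Int.toStr (mp.getD s 0 + 1)]) (mp.insert s (mp.getD s 0 + 1))
    else
      -- mp[s] = 1; ret.append(s)
      disambiguate_strings_goA rest (ret ++ [s]) (mp.insert s 1)

def disambiguate_strings (ls : List String) : List String :=
  disambiguate_strings_goA ls [] PySem.Dict.empty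

-- ===== PORT B =====
-- inner loop 'for i, x in enumerate(ls): if x == s: k += 1; out[i] = x if k == 1 else x + f"_{k}"'
-- The enumerate counter i is always a valid nonnegative index of out (len(out) = len(ls)),
-- so Python's out[i] = v is exactly List.set i v here; i is carried as a Nat counter.
def disambiguate_strings_innerB (s : String) : List String → Nat → List String → Int → List String
  | [], _, out, _ => out
  | x :: rest, i, out, k =>
    if x == s then
      disambiguate_strings_innerB s rest (i + 1)
        (out.set i (if k + 1 == 1 then x else x ++ "_" ++ PySem.Int.toStr (k + 1))) (k + 1)
    else
      disambiguate_strings_innerB s rest (i + 1) out k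

-- out = [''] * len(ls); for s in dict.fromkeys(ls): <inner loop>; return out
def disambiguate_strings_alt (ls : List String) : List String :=
  (PySem.List.dedup ls).foldl (fun out s => disambiguate_strings_innerB s ls 0 out 0)
    (List.replicate ls.length "")

-- ===== PRECONDITION & SPEC =====
def Spec_disambiguate_strings (ls : List String) (out : List String) : Prop := out = disambiguate_strings_alt ls
instance (ls : List String) (out : List String) : Decidable (Spec_disambiguate_strings ls out) := by unfold Spec_disambiguate_strings; infer_instance

-- ===== CLAIM (what is proved, stated in full; the proofs are below) =====
def Claim_equal_disambiguate_strings : Prop := ∀ (ls : List String), Dom_disambiguate_strings ls → Spec_disambiguate_strings ls (disambiguate_strings ls)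

-- ===== LEMMAS AND PROOFS =====

-- the common pointwise value: the m-th output element, from the count of ls[m] in ls[:m]
def disambVal (ls : List String) (m : Nat) : String :=
  if (ls.take m).count ls[m]! = 0 then ls[m]!
  else ls[m]! ++ "_" ++ PySem.Int.toStr (((ls.take m).count ls[m]! : Int) + 1)

lemma map_range_getElem! (l : List String) :
    (List.range l.length).map (fun m => l[m]!) = l := by
  apply List.ext_getElem
  · simp
  · intro n h1 h2
    simp_all

-- B's inner pass: starting at index i with k = count of s in ls[:i], it rewrites exactly
-- the positions m ≥ i holding s to disambVal ls m and leaves everything else.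
lemma innerB_eq (ls : List String) (s : String) :
    ∀ (tail : List String) (i : Nat) (out : List String) (k : Int),
    tail = ls.drop i → out.length = ls.length → k = ((ls.take i).count s : Int) →
    disambiguate_strings_innerB s tail i out k =
      (List.range ls.length).map
        (fun m => if i ≤ m ∧ ls[m]! = s then disambVal ls m else out[m]!) := by
  intro tail
  induction tail with
  | nil =>
    intro i out k htail hlen hk
    have hge : ls.length ≤ i := by
      have := List.drop_eq_nil_iff.mp htail.symm
      omega
    rw [disambiguate_strings_innerB]
    rw [List.map_congr_left (g := fun m => out[m]!)
      (by
        intro m hm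
        rw [List.mem_range] at hm
        rw [if_neg (fun h => absurd h.1 (by omega))])]
    rw [← hlen, map_range_getElem!]
  | cons x rest ih =>
    intro i out k htail hlen hk
    have hlt : i < ls.length := by
      have := congrArg List.length htail
      simp at this; omega
    have hx0 : ls[i] = x := by
      have h0 : ls[i + 0]? = some x := by
        rw [← List.getElem?_drop, ← htail]; rfl
      simp only [Nat.add_zero] at h0
      rw [List.getElem?_eq_getElem hlt] at h0
      exact Option.some.inj h0
    have hx : ls[i]! = x := by
      rw [getElem!_pos ls i hlt, hx0]
    have hrest : rest = ls.drop (i + 1) := by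
      have h1 := congrArg (List.drop 1) htail
      simp [List.drop_drop] at h1
      exact h1
    have htake : ls.take (i + 1) = ls.take i ++ [x] := by
      rw [List.take_add_one, List.getElem?_eq_getElem hlt]
      simp [hx0]
    rw [disambiguate_strings_innerB]
    by_cases hxs : x = s
    · rw [if_pos (by simp [hxs])]
      have hcnt : ((ls.take (i+1)).count s : Int) = k + 1 := by
        rw [htake, hk]; simp [hxs, List.count_append]
      have hval : (if k + 1 == 1 then x else x ++ "_" ++ PySem.Int.toStr (k + 1)) = disambVal ls i := by
        unfold disambVal
        rw [hx, hxs, hk]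
        by_cases h0 : (ls.take i).count s = 0
        · rw [h0]; simp
        · have hne1 : ¬ ((((ls.take i).count s : Int) + 1 == 1) = true) := by
            simp; omega
          rw [if_neg hne1, if_neg h0]
      rw [ih (i + 1) _ (k + 1) hrest (by simp [hlen]) hcnt.symm]
      apply List.map_congr_left
      intro m hm
      rw [List.mem_range] at hm
      by_cases hmi : m = i
      · subst hmi
        rw [if_neg (fun h => absurd h.1 (by omega)),
          if_pos (show m ≤ m ∧ ls[m]! = s from ⟨Nat.le_refl m, by rw [hx, hxs]⟩)]
        rw [getElem!_pos _ m (by rw [List.length_set, hlen]; exact hm)]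
        rw [List.getElem_set_self, hval]
      · have hne : (out.set i (if k + 1 == 1 then x else x ++ "_" ++ PySem.Int.toStr (k + 1)))[m]! = out[m]! := by
          by_cases hm2 : m < out.length
          · rw [getElem!_pos _ m (by rwa [List.length_set]), getElem!_pos _ m hm2,
              List.getElem_set, if_neg (fun h => hmi h.symm)]
          · rw [getElem!_neg _ m (by rwa [List.length_set]), getElem!_neg _ m hm2]
        rw [hne]
        by_cases hc : i ≤ m ∧ ls[m]! = s
        · rw [if_pos ⟨by omega, hc.2⟩, if_pos hc]
        · rw [if_neg (fun h => hc ⟨by omega, h.2⟩), if_neg hc]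
    · rw [if_neg (by simp [hxs])]
      have hcnt : ((ls.take (i+1)).count s : Int) = k := by
        rw [htake, hk]; simp [List.count_append, hxs]
      rw [ih (i + 1) out k hrest hlen hcnt.symm]
      apply List.map_congr_left
      intro m hm
      rw [List.mem_range] at hm
      by_cases hmi : m = i
      · subst hmi
        rw [if_neg (fun h => absurd h.1 (by omega)),
          if_neg (fun h => hxs (by rw [← hx]; exact h.2))]
      · by_cases hc : i ≤ m ∧ ls[m]! = s
        · rw [if_pos ⟨by omega, hc.2⟩, if_pos hc]
        · rw [if_neg (fun h => hc ⟨by omega, h.2⟩), if_neg hc]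

-- B's outer fold: processing the strings of ds rewrites exactly the positions whose string is in ds.
lemma foldl_innerB (ls : List String) :
    ∀ (ds out : List String), out.length = ls.length →
    ds.foldl (fun o s => disambiguate_strings_innerB s ls 0 o 0) out =
      (List.range ls.length).map
        (fun m => if ls[m]! ∈ ds then disambVal ls m else out[m]!) := by
  intro ds
  induction ds with
  | nil =>
    intro out hlen
    rw [List.foldl_nil]
    rw [List.map_congr_left (g := fun m => out[m]!) (by intro m hm; simp)]
    rw [← hlen, map_range_getElem!]
  | cons d ds ih =>
    intro out hlen
    rw [List.foldl_cons]
    have h1 : disambiguate_strings_innerB d ls 0 out 0 =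
        (List.range ls.length).map (fun m => if 0 ≤ m ∧ ls[m]! = d then disambVal ls m else out[m]!) :=
      innerB_eq ls d ls 0 out 0 rfl hlen (by simp)
    rw [h1, ih _ (by simp)]
    apply List.map_congr_left
    intro m hm
    rw [List.mem_range] at hm
    have hget : ((List.range ls.length).map
        (fun m => if 0 ≤ m ∧ ls[m]! = d then disambVal ls m else out[m]!))[m]! =
        (if 0 ≤ m ∧ ls[m]! = d then disambVal ls m else out[m]!) := by
      rw [getElem!_pos _ _ (by simpa using hm)]
      simp
    rw [hget]
    by_cases hmem : ls[m]! ∈ ds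
    · rw [if_pos hmem, if_pos (List.mem_cons_of_mem d hmem)]
    · rw [if_neg hmem]
      by_cases hd : ls[m]! = d
      · rw [if_pos ⟨Nat.zero_le m, hd⟩, if_pos (by rw [hd]; exact List.mem_cons_self)]
      · rw [if_neg (fun h => hd h.2), if_neg (fun h => (List.mem_cons.mp h).elim hd hmem)]

-- B computes the pointwise formula everywhere
lemma altB_eq (ls : List String) :
    disambiguate_strings_alt ls = (List.range ls.length).map (disambVal ls) := by
  unfold disambiguate_strings_alt
  rw [foldl_innerB ls _ _ (by simp)]
  apply List.map_congr_left
  intro m hm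
  rw [List.mem_range] at hm
  rw [if_pos (by rw [PySem.List.mem_dedup, getElem!_pos ls m hm]; exact List.getElem_mem hm)]

-- A's loop invariant: after processing pref, mp holds the counts of pref
lemma goA_eq (full : List String) :
    ∀ (rest pref ret : List String) (mp : PySem.Dict String Int),
    full = pref ++ rest →
    (∀ s, mp.getD s 0 = (pref.count s : Int)) →
    (∀ s, mp.contains s = decide (s ∈ pref)) →
    disambiguate_strings_goA rest ret mp =
      ret ++ (List.range rest.length).map (fun j => disambVal full (pref.length + j)) := by
  intro rest
  induction rest with
  | nil =>
    intro pref ret mp hfull hcnt hmem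
    simp [disambiguate_strings_goA]
  | cons x rest ih =>
    intro pref ret mp hfull hcnt hmem
    have hlt : pref.length < full.length := by
      rw [hfull]; simp
    have hgetx : full[pref.length]! = x := by
      rw [getElem!_pos full pref.length hlt]
      have h0 : full[pref.length]? = some x := by
        rw [hfull, List.getElem?_append_right (Nat.le_refl _)]
        simp
      rw [List.getElem?_eq_getElem hlt] at h0
      exact Option.some.inj h0
    have htakex : full.take pref.length = pref := by
      rw [hfull, List.take_left]
    have hval0 : disambVal full pref.length =
        (if pref.count x = 0 then x else x ++ "_" ++ PySem.Int.toStr ((pref.count x : Int) + 1)) := by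
      unfold disambVal
      rw [hgetx, htakex]
    have hstep : ∀ (ret' : List String) (mp' : PySem.Dict String Int),
        full = (pref ++ [x]) ++ rest →
        (∀ s, mp'.getD s 0 = ((pref ++ [x]).count s : Int)) →
        (∀ s, mp'.contains s = decide (s ∈ pref ++ [x])) →
        disambiguate_strings_goA rest ret' mp' =
          ret' ++ (List.range rest.length).map (fun j => disambVal full (pref.length + 1 + j)) := by
      intro ret' mp' h1 h2 h3
      rw [ih (pref ++ [x]) ret' mp' h1 h2 h3]
      simp [Nat.add_assoc]
    have hfull' : full = (pref ++ [x]) ++ rest := by simpa using hfull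
    have hrange : (List.range (rest.length + 1)).map (fun j => disambVal full (pref.length + j)) =
        disambVal full pref.length ::
          (List.range rest.length).map (fun j => disambVal full (pref.length + 1 + j)) := by
      rw [List.range_succ_eq_map, List.map_cons, List.map_map]
      have ht : List.map ((fun j => disambVal full (pref.length + j)) ∘ Nat.succ) (List.range rest.length)
          = List.map (fun j => disambVal full (pref.length + 1 + j)) (List.range rest.length) := by
        apply List.map_congr_left
        intro j _
        show disambVal full (pref.length + (j + 1)) = disambVal full (pref.length + 1 + j)
        congr 1
        omega
      rw [ht, Nat.add_zero]
    rw [disambiguate_strings_goA]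
    by_cases hmemb : x ∈ pref
    · have hc : mp.contains x = true := by rw [hmem]; simp [hmemb]
      rw [if_pos hc]
      rw [hstep _ _ hfull'
        (by
          intro t
          by_cases ht : t = x
          · rw [ht, PySem.Dict.getD_insert_self, hcnt]
            simp [List.count_append]
          · rw [PySem.Dict.getD_insert_of_ne _ _ _ ht, hcnt]
            have h1 : List.count t [x] = 0 := by simp [Ne.symm ht]
            simp [List.count_append, h1])
        (by
          intro t
          rw [PySem.Dict.contains_insert]
          by_cases ht : t = x
          · rw [ht]; simp
          · simp [ht, hmem])]
      have hk0 : pref.count x ≠ 0 := by simpa [List.count_eq_zero] using hmemb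
      simp only [List.length_cons, hrange, hval0, if_neg hk0, hcnt]
      simp [List.append_assoc]
    · have hc : mp.contains x = false := by rw [hmem]; simp [hmemb]
      rw [if_neg (by simp [hc])]
      rw [hstep _ _ hfull'
        (by
          intro t
          by_cases ht : t = x
          · rw [ht, PySem.Dict.getD_insert_self]
            have h0 : pref.count x = 0 := by simpa [List.count_eq_zero] using hmemb
            simp [List.count_append, h0]
          · rw [PySem.Dict.getD_insert_of_ne _ _ _ ht, hcnt]
            have h1 : List.count t [x] = 0 := by simp [Ne.symm ht]
            simp [List.count_append, h1])
        (by
          intro t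
          rw [PySem.Dict.contains_insert]
          by_cases ht : t = x
          · rw [ht]; simp
          · simp [ht, hmem])]
      have hk0 : pref.count x = 0 := by simpa [List.count_eq_zero] using hmemb
      simp only [List.length_cons, hrange, hval0, if_pos hk0]
      simp [List.append_assoc]

lemma A_eq (ls : List String) :
    disambiguate_strings ls = (List.range ls.length).map (disambVal ls) := by
  unfold disambiguate_strings
  rw [goA_eq ls ls [] [] PySem.Dict.empty rfl
    (by intro s; simp [PySem.Dict.getD_empty])
    (by intro s; simp [PySem.Dict.contains_empty])]
  simp

-- ===== VERDICT (by name: the statement is the Claim_ definition above) =====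
theorem disambiguate_strings_spec : Claim_equal_disambiguate_strings := by
  intro ls _
  unfold Spec_disambiguate_strings
  rw [A_eq, altB_eq]
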